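-- pv_equiv track=rewrite | github.com/pnicewicz421/aoc2024 | 09.py | get_dot_locs
-- ===== SOURCE A (Python) =====
-- def get_dot_locs(data):
--     indot = False
--     dotsize = 0
--     dot_locs = []
--     for dot_pos in range(len(data)):
--         if data[dot_pos] == '.':
--             if indot:
--                 dotsize += 1
--             else:
--                 indot = True
--                 dotsize = 1
--         elif data[dot_pos] != '.' and indot:
--             indot = False
--             dot_locs.append((dot_pos - dotsize, dotsize))
--             dotsize = 0
--     if indot:
--         dot_locs.append((dot_pos - dotsize, dotsize))
--
--     return dot_locs
-- ===== SOURCE B (Python) =====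
-- def get_dot_locs(data):
--     # run scanner: find each maximal run of '.' directly and record (start, length)
--     locs = []
--     i, n = 0, len(data)
--     while i < n:
--         if data[i] == '.':
--             j = i + 1
--             while j < n and data[j] == '.':
--                 j += 1
--             locs.append((i, j - i))
--             i = j
--         else:
--             i += 1
--     return locs
-- ===== Notes on version B (the rewrite author's own statement) =====
-- stated objective: simpler
-- what changed: Replaces A's indot/dotsize state-machine over range(len(data)) with a direct run scanner that, on meeting a '.', advances an inner index to the end of the dot run and records (start, length) immediately.
-- intended difference: On inputs whose last character is '.', A reports the trailing dot run as starting one position too early (e.g. 'a..' -> [(0, 2)], '..' -> [(-1, 2)]) because its final append reuses the last loop index instead of len(data); B returns the true start ('a..' -> [(1, 2)]), which is the intended run location. — e.g. on get_dot_locs("a.."): A returns [(0, 2)], B returns [(1, 2)]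
import Mathlib
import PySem

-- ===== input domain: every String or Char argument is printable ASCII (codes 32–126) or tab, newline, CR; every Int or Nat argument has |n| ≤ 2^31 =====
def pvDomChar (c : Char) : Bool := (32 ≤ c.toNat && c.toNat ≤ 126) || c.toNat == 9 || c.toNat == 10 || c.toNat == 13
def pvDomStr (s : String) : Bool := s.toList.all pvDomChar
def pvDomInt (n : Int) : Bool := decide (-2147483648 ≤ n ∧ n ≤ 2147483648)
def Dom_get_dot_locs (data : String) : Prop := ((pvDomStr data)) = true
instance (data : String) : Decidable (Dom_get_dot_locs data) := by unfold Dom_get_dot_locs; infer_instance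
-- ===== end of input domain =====

-- B replaces A's indot/dotsize state machine by a direct run scanner (objective: simpler);
-- on strings ending in '.', A's trailing-run start is off by one and B returns the intended start (see D_ below).

-- ===== PORT A =====
-- loop body of A: state (indot, dotsize, dot_locs), item (dot_pos, data[dot_pos])
def pvAStep (s : Bool × Int × List (Int × Int)) (p : Int × Char) : Bool × Int × List (Int × Int) :=
  if p.2 = '.' then
    if s.1 then (s.1, s.2.1 + 1, s.2.2)
    else (true, 1, s.2.2)
  else if p.2 ≠ '.' ∧ s.1 = true then
    (false, 0, s.2.2 ++ [(p.1 - s.2.1, s.2.1)])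
  else s

def get_dot_locs (data : String) : List (Int × Int) :=
  let l := data.toList
  -- 'for dot_pos in range(len(data))', indexing data[dot_pos] (index always in range)
  let r := (PySem.List.pyRange 0 (l.length : Int) 1).foldl
      (fun s dot_pos => pvAStep s (dot_pos, PySem.List.pyGetD l dot_pos ' ')) (false, 0, [])
  -- final 'if indot: append((dot_pos - dotsize, dotsize))'; here dot_pos = len(data) - 1
  -- (indot implies the loop ran, so the leftover loop variable is len(data) - 1)
  if r.1 then r.2.2 ++ [((l.length : Int) - 1 - r.2.1, r.2.1)] else r.2.2

-- ===== PORT B =====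
-- inner 'while j < n and data[j] == '.'' = takeWhile/dropWhile on the rest; outer while = recursion
def pvRuns : List Char → Int → List (Int × Int)
  | [], _ => []
  | c :: rest, pos =>
    if c = '.' then
      (pos, 1 + ((rest.takeWhile (· == '.')).length : Int)) ::
        pvRuns (rest.dropWhile (· == '.')) (pos + 1 + (rest.takeWhile (· == '.')).length)
    else pvRuns rest (pos + 1)
termination_by l _ => l.length
decreasing_by
  · exact Nat.lt_succ_of_le (List.length_dropWhile_le _ _)
  · simp

def get_dot_locs_alt (data : String) : List (Int × Int) := pvRuns data.toList 0

-- ===== PRECONDITION & SPEC =====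
-- On inputs whose last character is '.', A returns the trailing dot run with a start one too
-- small (its final append reuses the last loop index, len-1, instead of len); B returns the
-- run's true start, which is the intended value.
def D_get_dot_locs (data : String) : Prop := data.toList.getLast? = some '.'
instance (data : String) : Decidable (D_get_dot_locs data) := by unfold D_get_dot_locs; infer_instance

def Spec_get_dot_locs (data : String) (out : List (Int × Int)) : Prop := ¬ D_get_dot_locs data → out = get_dot_locs_alt data
instance (data : String) (out : List (Int × Int)) : Decidable (Spec_get_dot_locs data out) := by unfold Spec_get_dot_locs; infer_instance

def pvDiffWitness_get_dot_locs : String := "a.."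
def pvDiffWitnessOut_get_dot_locs : (List (Int × Int)) × (List (Int × Int)) := ([(0, 2)], [(1, 2)])

-- ===== CLAIM (what is proved, stated in full; the proofs are below) =====
def Claim_unchanged_get_dot_locs : Prop := ∀ (data : String), Dom_get_dot_locs data → Spec_get_dot_locs data (get_dot_locs data)
def Claim_changed_get_dot_locs : Prop := Dom_get_dot_locs (pvDiffWitness_get_dot_locs) ∧ D_get_dot_locs (pvDiffWitness_get_dot_locs) ∧ get_dot_locs (pvDiffWitness_get_dot_locs) = pvDiffWitnessOut_get_dot_locs.1 ∧ get_dot_locs_alt (pvDiffWitness_get_dot_locs) = pvDiffWitnessOut_get_dot_locs.2 ∧ pvDiffWitnessOut_get_dot_locs.1 ≠ pvDiffWitnessOut_get_dot_locs.2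
def Claim_exact_get_dot_locs : Prop := ∀ (data : String), Dom_get_dot_locs data → D_get_dot_locs data → get_dot_locs data ≠ get_dot_locs_alt data

-- ===== LEMMAS AND PROOFS =====

-- A's fold over the suffix l starting at absolute position pos, followed by A's finalization
-- (the global last index is pos + l.length - 1, an invariant of the recursion).
def pvFin (l : List Char) (pos : Int) (s : Bool × Int × List (Int × Int)) : List (Int × Int) :=
  let r := (PySem.List.enumerate l pos).foldl pvAStep s
  if r.1 then r.2.2 ++ [(pos + l.length - 1 - r.2.1, r.2.1)] else r.2.2

-- the run scanner as A computes it: a run reaching the end of the data starts one too early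
def pvRunsA : List Char → Int → List (Int × Int)
  | [], _ => []
  | c :: rest, pos =>
    if c = '.' then
      ((if rest.dropWhile (· == '.') = [] then pos - 1 else pos),
        1 + ((rest.takeWhile (· == '.')).length : Int)) ::
        pvRunsA (rest.dropWhile (· == '.')) (pos + 1 + (rest.takeWhile (· == '.')).length)
    else pvRunsA rest (pos + 1)
termination_by l _ => l.length
decreasing_by
  · exact Nat.lt_succ_of_le (List.length_dropWhile_le _ _)
  · simp

theorem pvA_eq_fin (data : String) :
    get_dot_locs data = pvFin data.toList 0 (false, 0, []) := by
  unfold get_dot_locs pvFin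
  rw [PySem.List.enumerate_eq_map_pyRange (d := ' '), List.foldl_map]
  norm_num

theorem pvFin_nil (pos : Int) (s : Bool × Int × List (Int × Int)) :
    pvFin [] pos s = if s.1 then s.2.2 ++ [(pos - 1 - s.2.1, s.2.1)] else s.2.2 := by
  unfold pvFin
  simp [PySem.List.enumerate_nil]

theorem pvFin_cons (c : Char) (rest : List Char) (pos : Int) (s : Bool × Int × List (Int × Int)) :
    pvFin (c :: rest) pos s = pvFin rest (pos + 1) (pvAStep s (pos, c)) := by
  unfold pvFin
  rw [PySem.List.enumerate_cons]
  simp only [List.foldl_cons, List.length_cons]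
  have h : pos + ((rest.length : Int) + 1) - 1 = pos + 1 + (rest.length : Int) - 1 := by ring
  push_cast
  rw [h]

theorem pvMain (l : List Char) :
    (∀ pos acc, pvFin l pos (false, 0, acc) = acc ++ pvRunsA l pos) ∧
    (∀ pos k acc, pvFin l pos (true, k, acc) =
      acc ++ ((if l.dropWhile (· == '.') = [] then pos - k - 1 else pos - k),
               k + ((l.takeWhile (· == '.')).length : Int)) ::
             pvRunsA (l.dropWhile (· == '.')) (pos + (l.takeWhile (· == '.')).length)) := by
  induction l with
  | nil =>
    constructor
    · intro pos acc
      rw [pvFin_nil]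
      simp [pvRunsA]
    · intro pos k acc
      rw [pvFin_nil]
      simp [pvRunsA]
      ring_nf
  | cons c rest ih =>
    constructor
    · intro pos acc
      rw [pvFin_cons]
      by_cases hc : c = '.'
      · have hstep : pvAStep (false, 0, acc) (pos, c) = (true, 1, acc) := by
          simp [pvAStep, hc]
        rw [hstep, ih.2]
        rw [pvRunsA]
        simp only [hc, if_true]
        split_ifs <;> ring_nf
      · have hstep : pvAStep (false, 0, acc) (pos, c) = (false, 0, acc) := by
          simp [pvAStep, hc]
        rw [hstep, ih.1]
        rw [pvRunsA]
        simp [hc]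
    · intro pos k acc
      rw [pvFin_cons]
      by_cases hc : c = '.'
      · have hstep : pvAStep (true, k, acc) (pos, c) = (true, k + 1, acc) := by
          simp [pvAStep, hc]
        rw [hstep, ih.2]
        simp only [hc, List.takeWhile_cons, List.dropWhile_cons, beq_self_eq_true, if_true,
          List.length_cons]
        split_ifs <;> (push_cast; ring_nf)
      · have hstep : pvAStep (true, k, acc) (pos, c) = (false, 0, acc ++ [(pos - k, k)]) := by
          simp [pvAStep, hc]
        rw [hstep, ih.1]
        have hcb : (c == '.') = false := by simp [hc]
        simp only [List.takeWhile_cons, List.dropWhile_cons, hcb, Bool.false_eq_true, if_false,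
          List.length_nil]
        rw [pvRunsA]
        simp [hc]
      
theorem pvA_eq_runsA (data : String) : get_dot_locs data = pvRunsA data.toList 0 := by
  rw [pvA_eq_fin]
  simpa using (pvMain data.toList).1 0 []

theorem pv_last_of_dropWhile_nil (rest : List Char) (h : rest.dropWhile (· == '.') = []) :
    rest.getLast? = some '.' ∨ rest = [] := by
  cases hr : rest.getLast? with
  | none => exact Or.inr (List.getLast?_eq_none_iff.mp hr)
  | some x =>
    left
    have hx : x ∈ rest := List.mem_of_getLast? hr
    have : rest.takeWhile (· == '.') = rest := by
      have := List.takeWhile_append_dropWhile (p := (· == '.')) (l := rest)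
      rw [h, List.append_nil] at this
      exact this
    have hx2 : x ∈ rest.takeWhile (· == '.') := by rwa [this]
    have hx' := List.mem_takeWhile_imp hx2
    simp at hx'
    rw [hx']

theorem pv_getLast?_cons_of_ne_nil (c : Char) (rest : List Char) (hne : rest ≠ []) :
    (c :: rest).getLast? = rest.getLast? := by
  cases rest with
  | nil => exact absurd rfl hne
  | cons b t => exact List.getLast?_cons_cons

theorem pv_last_cons_ne (c : Char) (rest : List Char) (h : (c :: rest).getLast? ≠ some '.')
    (hne : rest ≠ []) : rest.getLast? ≠ some '.' := by
  rwa [pv_getLast?_cons_of_ne_nil c rest hne] at h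

theorem pv_last_drop (rest : List Char) (hd : rest.dropWhile (· == '.') ≠ []) :
    (rest.dropWhile (· == '.')).getLast? = rest.getLast? := by
  conv_rhs => rw [← List.takeWhile_append_dropWhile (p := (· == '.')) (l := rest)]
  rw [List.getLast?_append_of_ne_nil _ hd]

theorem pvRunsA_eq_runs : ∀ (n : Nat) (l : List Char) (pos : Int), l.length ≤ n →
    l.getLast? ≠ some '.' → pvRunsA l pos = pvRuns l pos := by
  intro n
  induction n with
  | zero =>
    intro l pos hl _
    have : l = [] := List.length_eq_zero_iff.mp (Nat.le_zero.mp hl)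
    subst this
    rw [pvRunsA, pvRuns]
  | succ n ih =>
    intro l pos hl hlast
    cases l with
    | nil => rw [pvRunsA, pvRuns]
    | cons c rest =>
      by_cases hc : c = '.'
      · have hd : rest.dropWhile (· == '.') ≠ [] := by
          intro h
          rcases pv_last_of_dropWhile_nil rest h with h' | h'
          · exact hlast (by rw [pv_getLast?_cons_of_ne_nil c rest (by
              intro hn; rw [hn] at h'; simp at h')]; exact h')
          · subst h'; exact hlast (by simp [hc])
        have h1 := List.length_dropWhile_le (· == '.') rest
        have h2 : rest.length ≤ n := Nat.le_of_succ_le_succ (by simpa using hl)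
        have hrne : rest ≠ [] := by intro hn; subst hn; simp at hd
        have hlast' : (rest.dropWhile (· == '.')).getLast? ≠ some '.' := by
          rw [pv_last_drop rest hd]
          exact pv_last_cons_ne c rest hlast hrne
        have htail := ih (rest.dropWhile (· == '.'))
          (pos + 1 + ((rest.takeWhile (· == '.')).length : Int)) (by omega) hlast'
        rw [pvRunsA, pvRuns]
        simp [hc, hd, htail]
      · have h2 : rest.length ≤ n := Nat.le_of_succ_le_succ (by simpa using hl)
        rw [pvRunsA, pvRuns]
        rcases eq_or_ne rest [] with hr | hr
        · subst hr
          simp [hc]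
          rw [pvRunsA, pvRuns]
        · simp [hc]
          exact ih rest (pos + 1) h2 (pv_last_cons_ne c rest hlast hr)

theorem pvRunsA_ne_runs : ∀ (n : Nat) (l : List Char) (pos : Int), l.length ≤ n →
    l.getLast? = some '.' → pvRunsA l pos ≠ pvRuns l pos := by
  intro n
  induction n with
  | zero =>
    intro l pos hl hlast
    have : l = [] := List.length_eq_zero_iff.mp (Nat.le_zero.mp hl)
    subst this; simp at hlast
  | succ n ih =>
    intro l pos hl hlast
    cases l with
    | nil => simp at hlast
    | cons c rest =>
      by_cases hc : c = '.'
      · rcases eq_or_ne (rest.dropWhile (· == '.')) [] with hd | hd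
        · rw [pvRunsA, pvRuns]
          simp only [hc, hd]
          intro h
          have := (List.cons.injEq _ _ _ _).mp h
          have h1 := congrArg Prod.fst this.1
          simp at h1
        · rw [pvRunsA, pvRuns]
          simp only [hc, if_neg hd]
          intro h
          have := (List.cons.injEq _ _ _ _).mp h
          refine ih _ _ ?_ ?_ this.2
          · have h1 := List.length_dropWhile_le (· == '.') rest
            have h2 : rest.length ≤ n := Nat.le_of_succ_le_succ (by simpa using hl)
            omega
          · rw [pv_last_drop rest hd]
            have hr : rest ≠ [] := by intro hn; subst hn; simp at hd
            rwa [pv_getLast?_cons_of_ne_nil c rest hr] at hlast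
      · rw [pvRunsA, pvRuns]
        simp only [hc]
        have hr : rest ≠ [] := by
          intro hn; subst hn; simp at hlast; exact hc hlast
        exact ih _ _ (Nat.le_of_succ_le_succ (by simpa using hl))
          (by rwa [pv_getLast?_cons_of_ne_nil c rest hr] at hlast)

-- ===== VERDICT (by name: the statement is the Claim_ definition above) =====
theorem get_dot_locs_spec : Claim_unchanged_get_dot_locs := by
  intro data _ hD
  rw [pvA_eq_runsA]
  unfold get_dot_locs_alt
  exact pvRunsA_eq_runs data.toList.length data.toList 0 le_rfl hD

theorem get_dot_locs_changed : Claim_changed_get_dot_locs := by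
  unfold Claim_changed_get_dot_locs
  refine ⟨by decide, by decide, by decide, ?_, by decide⟩
  show get_dot_locs_alt pvDiffWitness_get_dot_locs = pvDiffWitnessOut_get_dot_locs.2
  have h : pvDiffWitness_get_dot_locs.toList = ['a', '.', '.'] := by decide
  simp only [get_dot_locs_alt, pvDiffWitnessOut_get_dot_locs, h]
  rw [pvRuns, if_neg (by decide : ¬ ('a' = '.')), pvRuns, if_pos rfl]
  norm_num [List.takeWhile, List.dropWhile, pvRuns]

theorem get_dot_locs_tight : Claim_exact_get_dot_locs := by
  intro data _ hD
  rw [pvA_eq_runsA]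
  unfold get_dot_locs_alt
  exact pvRunsA_ne_runs data.toList.length data.toList 0 le_rfl hD
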